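-- pv_equiv track=rewrite | github.com/TalitaAnthonio/after-tacl | word-embeddings/save_bert_embeddings.py | filter_second_step
-- ===== SOURCE A (Python) =====
-- def filter_second_step(filtered_fillers):
--     d = {}
--
--     for elem in filtered_fillers:
--         if len(elem.split()) == 2:
--             noun = elem.split()[1]
--         elif len(elem.split()) == 3:
--             noun = elem.split()[2]
--         else:
--             noun = elem
--         if noun in d.keys():
--             d[noun].append(elem)
--         else:
--             d[noun] = []
--             d[noun].append(elem)
--
--     return d
-- ===== SOURCE B (Python) =====
-- def filter_second_step(filtered_fillers):
--     def key(elem):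
--         parts = elem.split()
--         if len(parts) == 2:
--             return parts[1]
--         if len(parts) == 3:
--             return parts[2]
--         return elem
--
--     return {k: [e for e in filtered_fillers if key(e) == k]
--             for k in dict.fromkeys(map(key, filtered_fillers))}
-- ===== Notes on version B (the rewrite author's own statement) =====
-- stated objective: alternative
-- what changed: B abandons A's single-pass incremental grouping (per-element membership test and append into a growing dict) for a staged group-by-filter: first compute the ordered distinct keys, then build each group with a full filter scan of the input per key (O(n*k) scans instead of one O(n) pass).
import Mathlib
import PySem

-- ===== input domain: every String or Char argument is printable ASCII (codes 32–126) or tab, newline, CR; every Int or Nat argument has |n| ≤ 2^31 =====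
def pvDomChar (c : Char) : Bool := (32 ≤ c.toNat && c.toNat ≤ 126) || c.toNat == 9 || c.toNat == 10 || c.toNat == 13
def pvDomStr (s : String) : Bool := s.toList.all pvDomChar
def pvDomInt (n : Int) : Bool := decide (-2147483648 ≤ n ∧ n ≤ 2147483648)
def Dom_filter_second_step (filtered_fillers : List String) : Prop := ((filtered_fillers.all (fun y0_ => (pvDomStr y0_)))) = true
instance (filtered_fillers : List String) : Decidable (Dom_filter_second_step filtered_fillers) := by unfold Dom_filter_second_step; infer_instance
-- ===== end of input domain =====

-- B replaces A's single-pass incremental grouping (membership test + append per element) with a staged group-by-filter: ordered distinct keys first, then one filter scan of the input per key; same returned dict.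


-- ===== PORT A =====
-- one loop iteration: noun = elem.split()[1] / [2] guarded by the length test (so pyGet? is never none; the .getD "" totalizer is unreachable),
-- then the membership-tested append: d[noun].append(elem)  /  d[noun] = []; d[noun].append(elem)
def pvStepA (d : PySem.Dict String (List String)) (elem : String) : PySem.Dict String (List String) :=
  let noun : String :=
    if (PySem.Str.split₀ elem).length = 2 then (PySem.List.pyGet? (PySem.Str.split₀ elem) 1).getD ""
    else if (PySem.Str.split₀ elem).length = 3 then (PySem.List.pyGet? (PySem.Str.split₀ elem) 2).getD ""
    else elem
  if d.contains noun then
    d.insert noun (d.getD noun [] ++ [elem])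
  else
    let d1 := d.insert noun []
    d1.insert noun (d1.getD noun [] ++ [elem])

def filter_second_step (filtered_fillers : List String) : List (String × List String) :=
  (filtered_fillers.foldl pvStepA PySem.Dict.empty).items

-- ===== PORT B =====
-- B's key(elem) helper
def pvKeyB (elem : String) : String :=
  let parts := PySem.Str.split₀ elem
  if parts.length = 2 then (PySem.List.pyGet? parts 1).getD ""
  else if parts.length = 3 then (PySem.List.pyGet? parts 2).getD ""
  else elem

-- {k: [e for e in filtered_fillers if key(e) == k] for k in dict.fromkeys(map(key, filtered_fillers))}
-- (dict.fromkeys dedups keeping first-occurrence order = PySem.List.dedup of the mapped keys)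
def filter_second_step_alt (filtered_fillers : List String) : List (String × List String) :=
  let orderedKeys := PySem.List.dedup (filtered_fillers.map pvKeyB)
  (orderedKeys.foldl
      (fun d k => d.insert k (filtered_fillers.filter (fun e => pvKeyB e == k)))
      PySem.Dict.empty).items

-- ===== PRECONDITION & SPEC =====
def Spec_filter_second_step (filtered_fillers : List String) (out : List (String × List String)) : Prop := out = filter_second_step_alt filtered_fillers
instance (filtered_fillers : List String) (out : List (String × List String)) : Decidable (Spec_filter_second_step filtered_fillers out) := by unfold Spec_filter_second_step; infer_instance

-- ===== CLAIM (what is proved, stated in full; the proofs are below) =====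
def Claim_equal_filter_second_step : Prop := ∀ (filtered_fillers : List String), Dom_filter_second_step filtered_fillers → Spec_filter_second_step filtered_fillers (filter_second_step filtered_fillers)

-- ===== LEMMAS AND PROOFS =====

-- A's membership-tested branch pair is exactly one Dict.modify at the key pvKeyB computes
lemma pvStepA_eq_modify (d : PySem.Dict String (List String)) (e : String) :
    pvStepA d e = d.modify (pvKeyB e) [] (fun v => v ++ [e]) := by
  simp only [pvStepA, pvKeyB]
  by_cases h : d.contains (if (PySem.Str.split₀ e).length = 2 then (PySem.List.pyGet? (PySem.Str.split₀ e) 1).getD ""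
    else if (PySem.Str.split₀ e).length = 3 then (PySem.List.pyGet? (PySem.Str.split₀ e) 2).getD "" else e) <;>
    simp [h, PySem.Dict.modify, PySem.Dict.getD_insert_self, PySem.Dict.insert_insert_self,
      PySem.Dict.getD_of_not_contains]

-- A's side in canonical form: group k ↦ all elements whose key is k, keys in first-occurrence order
lemma items_foldl_modify_key (l : List String) :
    (l.foldl (fun d e => d.modify (pvKeyB e) [] (fun v => v ++ [e])) PySem.Dict.empty).items
      = (PySem.List.dedup (l.map pvKeyB)).map
          (fun k => (k, l.filter (fun e => pvKeyB e == k))) := by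
  have hfold : l.foldl (fun d e => d.modify (pvKeyB e) [] (fun v => v ++ [e])) PySem.Dict.empty
      = (l.map (fun e => (pvKeyB e, e))).foldl
          (fun d p => d.modify p.1 [] (fun v => v ++ [p.2])) PySem.Dict.empty := by
    rw [List.foldl_map]
  have hnd : (l.foldl (fun d e => d.modify (pvKeyB e) [] (fun v => v ++ [e])) PySem.Dict.empty).keys.Nodup :=
    PySem.Dict.nodup_keys_foldl_modify_key l pvKeyB [] (fun d e => fun v => v ++ [e]) PySem.Dict.empty
      PySem.Dict.nodup_keys_empty
  rw [PySem.Dict.items_eq_map_keys _ hnd []]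
  rw [PySem.Dict.keys_foldl_modify_key]
  have hkeys : PySem.Set.update (PySem.Dict.empty : PySem.Dict String (List String)).keys (l.map pvKeyB)
      = PySem.List.dedup (l.map pvKeyB) := by
    simp [PySem.Set.update, PySem.Set.ofList_eq_foldl, PySem.Dict.keys_empty, PySem.List.dedup_eq_ofList]
  rw [hkeys]
  apply List.map_congr_left
  intro k _
  rw [hfold, PySem.Dict.getD_foldl_modify_append]
  rw [List.filter_map]; simp [Function.comp_def]

-- B's side: inserting each distinct key once (all fresh, nodup) just lists the (key, group) pairs
lemma items_alt (l : List String) :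
    filter_second_step_alt l
      = (PySem.List.dedup (l.map pvKeyB)).map
          (fun k => (k, l.filter (fun e => pvKeyB e == k))) := by
  have h := PySem.Dict.items_foldl_insert_fresh
      (PySem.List.dedup (l.map pvKeyB)) (fun x => x)
      (fun k => l.filter (fun e => pvKeyB e == k)) PySem.Dict.empty
      (by intro a _; exact PySem.Dict.contains_empty a)
      (by simpa using PySem.List.nodup_dedup (l.map pvKeyB))
  unfold filter_second_step_alt
  simpa [PySem.Dict.items] using h

-- ===== VERDICT (by name: the statement is the Claim_ definition above) =====
theorem filter_second_step_spec : Claim_equal_filter_second_step := by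
  intro l _
  unfold Spec_filter_second_step filter_second_step
  have hstep : pvStepA = fun d e => d.modify (pvKeyB e) [] (fun v => v ++ [e]) :=
    funext fun d => funext fun e => pvStepA_eq_modify d e
  rw [hstep, items_foldl_modify_key, items_alt]
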